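-- pv_equiv track=rewrite | github.com/atadagg/Lookfor_Hackathon_2026_Munich | backend/tests/test_anonymized_tickets.py | _parse_first_customer_message
-- ===== SOURCE A (Python) =====
-- def _parse_first_customer_message(conversation: str) -> str | None:
--     """Extract the first customer message from the conversation string."""
--     if not conversation:
--         return None
--     idx = conversation.find('Customer\'s message: "')
--     if idx == -1:
--         return None
--     start = idx + len('Customer\'s message: "')
--     # Find the earliest closing delimiter (before next message)
--     end_agent = conversation.find('" Agent\'s message:', start)
--     end_customer = conversation.find('" Customer\'s message:', start)
--     ends = [e for e in (end_agent, end_customer) if e != -1]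
--     end = min(ends) if ends else len(conversation)
--     return conversation[start:end].strip()
-- ===== SOURCE B (Python) =====
-- def _parse_first_customer_message(conversation: str) -> str | None:
--     """Extract the first customer message from the conversation string."""
--     marker = 'Customer\'s message: "'
--     n = len(conversation)
--     start = None
--     for i in range(n):
--         if conversation.startswith(marker, i):
--             start = i + len(marker)
--             break
--     if start is None:
--         return None
--     for j in range(start, n):
--         if conversation.startswith('" Agent\'s message:', j) or \
--            conversation.startswith('" Customer\'s message:', j):
--             return conversation[start:j].strip()
--     return conversation[start:].strip()
-- ===== Notes on version B (the rewrite author's own statement) =====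
-- stated objective: alternative
-- what changed: Replaced the two independent find calls plus filter/min index arithmetic by a single forward scan (startswith at each position) that stops at the first occurrence of either closing delimiter, and dropped the redundant empty-string guard.
import Mathlib
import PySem

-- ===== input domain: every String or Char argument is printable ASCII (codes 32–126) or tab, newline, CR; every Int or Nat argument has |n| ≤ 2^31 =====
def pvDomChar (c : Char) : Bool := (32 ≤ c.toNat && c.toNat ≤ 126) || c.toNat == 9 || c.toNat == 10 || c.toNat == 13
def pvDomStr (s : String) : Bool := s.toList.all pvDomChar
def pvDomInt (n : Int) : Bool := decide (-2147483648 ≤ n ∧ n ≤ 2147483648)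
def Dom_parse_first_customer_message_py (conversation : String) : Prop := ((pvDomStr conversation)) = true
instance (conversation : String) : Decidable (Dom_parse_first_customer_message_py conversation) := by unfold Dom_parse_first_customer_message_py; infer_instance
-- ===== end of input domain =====

-- B replaces A's two independent `find` calls plus filter/min index arithmetic by a
-- single forward scan that stops at the first occurrence of either closing delimiter
-- (objective: alternative — same asymptotic cost, different search strategy).


-- ===== PORT A =====
def parse_first_customer_message_py (conversation : String) : Option String :=
  let s := conversation.toList
  if s.length = 0 then none
  else
    let marker := "Customer's message: \"".toList
    let idx := PySem.Chars.find s marker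
    if idx = -1 then none
    else
      let start : Int := idx + marker.length
      let endAgent := PySem.Chars.findFrom s "\" Agent's message:".toList start none
      let endCustomer := PySem.Chars.findFrom s "\" Customer's message:".toList start none
      let ends := [endAgent, endCustomer].filter (fun e => e ≠ -1)
      let e : Int := match PySem.List.min? ends (fun x => x) with
        | some m => m
        | none => (s.length : Int)
      some (String.ofList (PySem.Chars.strip (PySem.Chars.slice s (some start) (some e))))

-- ===== PORT B =====
-- first index i with i0 ≤ i < s.length at which the predicate holds of s.drop i
-- (B's Python `for i in range(i0, n): if pred-at-i: …` loops, made a recursion on i)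
def pvScanFrom (s : List Char) (p : List Char → Bool) (i : Nat) : Option Nat :=
  if _h : i < s.length then
    if p (s.drop i) then some i else pvScanFrom s p (i + 1)
  else none
termination_by s.length - i

def parse_first_customer_message_py_alt (conversation : String) : Option String :=
  let s := conversation.toList
  let marker := "Customer's message: \"".toList
  match pvScanFrom s (fun t => PySem.Chars.startswith t marker) 0 with
  | none => none
  | some i =>
    let start := i + marker.length
    match pvScanFrom s
        (fun t => PySem.Chars.startswith t "\" Agent's message:".toList ||
                  PySem.Chars.startswith t "\" Customer's message:".toList) start with
    | none => some (String.ofList (PySem.Chars.strip (s.drop start)))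
    | some j =>
        some (String.ofList (PySem.Chars.strip
          (PySem.Chars.slice s (some (start : Int)) (some (j : Int)))))

-- ===== PRECONDITION & SPEC =====
def Spec_parse_first_customer_message_py (conversation : String) (out : Option String) : Prop := out = parse_first_customer_message_py_alt conversation
instance (conversation : String) (out : Option String) : Decidable (Spec_parse_first_customer_message_py conversation out) := by unfold Spec_parse_first_customer_message_py; infer_instance

-- ===== CLAIM (what is proved, stated in full; the proofs are below) =====
def Claim_equal_parse_first_customer_message_py : Prop := ∀ (conversation : String), Dom_parse_first_customer_message_py conversation → Spec_parse_first_customer_message_py conversation (parse_first_customer_message_py conversation)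

-- ===== LEMMAS AND PROOFS =====

theorem pvScanFrom_none_iff (s : List Char) (p : List Char → Bool) (i : Nat) :
    pvScanFrom s p i = none ↔ ∀ j, i ≤ j → j < s.length → p (s.drop j) = false := by
  fun_induction pvScanFrom s p i with
  | case1 i h hp =>
    constructor
    · intro h'; cases h'
    · intro hall; exact absurd (hall i le_rfl h) (by simp [hp])
  | case2 i h hp ih =>
    rw [ih]
    constructor
    · intro hall j hij hjl
      rcases Nat.eq_or_lt_of_le hij with rfl | hlt
      · simpa using hp
      · exact hall j hlt hjl
    · intro hall j hij hjl; exact hall j (le_of_lt (Nat.lt_of_lt_of_le (Nat.lt_succ_self i) hij)) hjl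
  | case3 i h => simp; omega

theorem pvScanFrom_eq_some (s : List Char) (p : List Char → Bool) (i j : Nat)
    (hij : i ≤ j) (hjl : j < s.length) (hp : p (s.drop j) = true)
    (hmin : ∀ k, i ≤ k → k < j → p (s.drop k) = false) :
    pvScanFrom s p i = some j := by
  fun_induction pvScanFrom s p i with
  | case1 i h hpt =>
    rcases Nat.eq_or_lt_of_le hij with rfl | hlt
    · rfl
    · exact absurd (hmin i le_rfl hlt) (by simp [hpt])
  | case2 i h hpf ih =>
    rcases Nat.eq_or_lt_of_le hij with rfl | hlt
    · rw [hp] at hpf; exact absurd rfl hpf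
    · exact ih hlt (fun k hk hk' => hmin k (le_of_lt (Nat.lt_of_lt_of_le (Nat.lt_succ_self i) hk)) hk')
  | case3 i h => omega

-- ===== VERDICT (by name: the statement is the Claim_ definition above) =====
-- find = -1 means no occurrence anywhere, hence no prefix at any drop
theorem pv_find_none_no_prefix (t pat : List Char) (h : PySem.Chars.find t pat = -1)
    (d : Nat) : ¬ pat <+: t.drop d := by
  intro hp
  have hin : PySem.Chars.isIn pat t = true :=
    (PySem.Chars.exists_prefix_drop_iff_isIn pat t).mp ⟨d, hp⟩
  rw [PySem.Chars.isIn_iff_infix] at hin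
  rw [PySem.Chars.find_eq_neg_one_iff] at h
  exact h hin

theorem parse_first_customer_message_py_spec : Claim_equal_parse_first_customer_message_py := by
  unfold Claim_equal_parse_first_customer_message_py
  intro conv _
  unfold Spec_parse_first_customer_message_py parse_first_customer_message_py parse_first_customer_message_py_alt
  set s := conv.toList with hs
  set M := ("Customer's message: \"".toList) with hM
  set P1 := ("\" Agent's message:".toList) with hP1
  set P2 := ("\" Customer's message:".toList) with hP2
  by_cases hfind : PySem.Chars.find s M = -1
  · -- marker absent: both sides are none
    have hscan : pvScanFrom s (fun t => PySem.Chars.startswith t M) 0 = none := by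
      rw [pvScanFrom_none_iff]
      intro j _ _
      rw [Bool.eq_false_iff, Ne, PySem.Chars.startswith_iff]
      exact pv_find_none_no_prefix s M hfind j
    simp [hfind, hscan]
  · -- marker found at k
    have hge : 0 ≤ PySem.Chars.find s M := by
      have := PySem.Chars.neg_one_le_find s M; omega
    set k := (PySem.Chars.find s M).toNat with hk
    have hkfind : PySem.Chars.find s M = (k : Int) := by omega
    obtain ⟨hpref, hminM⟩ := PySem.Chars.find_spec hge
    have hMlen : M.length = 21 := by decide
    have hlenle : M.length ≤ s.length - k := by
      have := hpref.length_le
      simpa [List.length_drop] using this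
    have hklt : k < s.length := by omega
    have hs0 : ¬ s.length = 0 := by omega
    have hscan1 : pvScanFrom s (fun t => PySem.Chars.startswith t M) 0 = some k := by
      apply pvScanFrom_eq_some s _ 0 k (Nat.zero_le k) hklt
      · exact (PySem.Chars.startswith_iff _ _).mpr hpref
      · intro j _ hj
        rw [Bool.eq_false_iff, Ne, PySem.Chars.startswith_iff]
        exact hminM j hj
    set st := k + M.length with hst
    have hstle : st ≤ s.length := by omega
    have hcast : PySem.Chars.find s M + (M.length : Int) = ((st : Nat) : Int) := by
      rw [hkfind]; omega
    simp only [if_neg hs0, if_neg hfind, hscan1, hcast,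
        PySem.Chars.findFrom_natCast s P1 st hstle,
        PySem.Chars.findFrom_natCast s P2 st hstle]
    set g1 := PySem.Chars.find (s.drop st) P1 with hg1d
    set g2 := PySem.Chars.find (s.drop st) P2 with hg2d
    have hg1ge : -1 ≤ g1 := PySem.Chars.neg_one_le_find (s.drop st) P1
    have hg2ge : -1 ≤ g2 := PySem.Chars.neg_one_le_find (s.drop st) P2
    -- prefix-at-k facts transported between s.drop j and (s.drop st).drop d
    have hdrop : ∀ j : Nat, st ≤ j → (s.drop st).drop (j - st) = s.drop j := by
      intro j hj
      rw [List.drop_drop]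
      congr 1
      omega
    have hnoP : ∀ (pat : List Char), PySem.Chars.find (s.drop st) pat = -1 →
        ∀ j, st ≤ j → ¬ pat <+: s.drop j := by
      intro pat hneg j hj hp
      exact pv_find_none_no_prefix (s.drop st) pat hneg (j - st) (by rw [hdrop j hj]; exact hp)
    by_cases hg1 : g1 = -1 <;> by_cases hg2 : g2 = -1
    · -- neither delimiter: A slices to end, B's scan fails
      have hscan2 : pvScanFrom s (fun t => PySem.Chars.startswith t P1 ||
          PySem.Chars.startswith t P2) st = none := by
        rw [pvScanFrom_none_iff]
        intro j hj _
        rw [Bool.or_eq_false_iff]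
        constructor <;> (rw [Bool.eq_false_iff, Ne, PySem.Chars.startswith_iff])
        · exact hnoP P1 hg1 j hj
        · exact hnoP P2 hg2 j hj
      have hmin0 : PySem.List.min? ([] : List Int) (fun x => x) = none := rfl
      have hc2 : ((k : Int) + (M.length : Int)) = ((st : Nat) : Int) := by omega
      have hslice : PySem.List.slice s (some (st : Int)) (some (s.length : Int)) = s.drop st := by
        rw [PySem.List.slice_natCast]
        exact List.take_of_length_le (by simp)
      have hfilt : List.filter (fun e => decide (e ≠ -1)) [(-1 : Int), -1] = [] := by simp
      simp only [PySem.Chars.slice_eq_listSlice, if_pos hg1, if_pos hg2, ← hst, hscan2,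
        hfilt, hmin0, hslice]
    · -- only the Customer delimiter occurs
      have h0g : 0 ≤ g2 := by omega
      obtain ⟨hp2, hmin2⟩ := PySem.Chars.find_spec h0g
      set j := st + g2.toNat with hj
      have hjst : st ≤ j := by omega
      have hpj : P2 <+: s.drop j := by
        have := hdrop j hjst
        rw [show j - st = g2.toNat by omega] at this
        rwa [this] at hp2
      have hjlt : j < s.length := by
        have h1 := hpj.length_le
        have h2 : P2.length = 21 := by decide
        simp [List.length_drop] at h1
        omega
      have hscan2 : pvScanFrom s (fun t => PySem.Chars.startswith t P1 ||
          PySem.Chars.startswith t P2) st = some j := by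
        apply pvScanFrom_eq_some s _ st j hjst hjlt
        · rw [Bool.or_eq_true]
          exact Or.inr ((PySem.Chars.startswith_iff _ _).mpr hpj)
        · intro k' hk1 hk2
          rw [Bool.or_eq_false_iff]
          constructor <;> (rw [Bool.eq_false_iff, Ne, PySem.Chars.startswith_iff])
          · exact hnoP P1 hg1 k' hk1
          · intro hp
            refine hmin2 (k' - st) (by omega) ?_
            rwa [hdrop k' hk1]
      have hne2 : ((st : Int) + g2) ≠ -1 := by omega
      have hends : List.filter (fun e => decide (e ≠ -1)) [(-1 : Int), (st : Int) + g2] =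
          [(st : Int) + g2] := by simp [hne2]
      have hmin? : PySem.List.min? [(st : Int) + g2] (fun x => x) = some ((st : Int) + g2) := by
        rw [PySem.List.min?_id_cons]; rfl
      have hcj : ((j : Nat) : Int) = (st : Int) + g2 := by omega
      simp only [PySem.Chars.slice_eq_listSlice, if_pos hg1, if_neg hg2, hends, ← hst, hmin?, hscan2, hcj]
    · -- only the Agent delimiter occurs
      have h0g : 0 ≤ g1 := by omega
      obtain ⟨hp1, hmin1⟩ := PySem.Chars.find_spec h0g
      set j := st + g1.toNat with hj
      have hjst : st ≤ j := by omega
      have hpj : P1 <+: s.drop j := by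
        have := hdrop j hjst
        rw [show j - st = g1.toNat by omega] at this
        rwa [this] at hp1
      have hjlt : j < s.length := by
        have h1 := hpj.length_le
        have h2 : P1.length = 18 := by decide
        simp [List.length_drop] at h1
        omega
      have hscan2 : pvScanFrom s (fun t => PySem.Chars.startswith t P1 ||
          PySem.Chars.startswith t P2) st = some j := by
        apply pvScanFrom_eq_some s _ st j hjst hjlt
        · rw [Bool.or_eq_true]
          exact Or.inl ((PySem.Chars.startswith_iff _ _).mpr hpj)
        · intro k' hk1 hk2
          rw [Bool.or_eq_false_iff]
          constructor <;> (rw [Bool.eq_false_iff, Ne, PySem.Chars.startswith_iff])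
          · intro hp
            refine hmin1 (k' - st) (by omega) ?_
            rwa [hdrop k' hk1]
          · exact hnoP P2 hg2 k' hk1
      have hne1 : ((st : Int) + g1) ≠ -1 := by omega
      have hends : List.filter (fun e => decide (e ≠ -1)) [(st : Int) + g1, -1] =
          [(st : Int) + g1] := by simp [hne1]
      have hmin? : PySem.List.min? [(st : Int) + g1] (fun x => x) = some ((st : Int) + g1) := by
        rw [PySem.List.min?_id_cons]; rfl
      have hcj : ((j : Nat) : Int) = (st : Int) + g1 := by omega
      simp only [PySem.Chars.slice_eq_listSlice, if_neg hg1, if_pos hg2, hends, ← hst, hmin?, hscan2, hcj]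
    · -- both delimiters occur: the earlier one wins
      have h0g1 : 0 ≤ g1 := by omega
      have h0g2 : 0 ≤ g2 := by omega
      obtain ⟨hp1, hmin1⟩ := PySem.Chars.find_spec h0g1
      obtain ⟨hp2, hmin2⟩ := PySem.Chars.find_spec h0g2
      set g := min g1 g2 with hg
      have h0g : 0 ≤ g := le_min h0g1 h0g2
      set j := st + g.toNat with hj
      have hjst : st ≤ j := by omega
      have hpj : P1 <+: s.drop j ∨ P2 <+: s.drop j := by
        have hd := hdrop j hjst
        rw [show j - st = g.toNat by omega] at hd
        rcases le_total g1 g2 with hle | hle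
        · left
          rw [show g.toNat = g1.toNat by omega] at hd
          rwa [hd] at hp1
        · right
          rw [show g.toNat = g2.toNat by omega] at hd
          rwa [hd] at hp2
      have hjlt : j < s.length := by
        rcases hpj with hp | hp
        · have h1 := hp.length_le
          have h2 : P1.length = 18 := by decide
          simp [List.length_drop] at h1
          omega
        · have h1 := hp.length_le
          have h2 : P2.length = 21 := by decide
          simp [List.length_drop] at h1
          omega
      have hscan2 : pvScanFrom s (fun t => PySem.Chars.startswith t P1 ||
          PySem.Chars.startswith t P2) st = some j := by
        apply pvScanFrom_eq_some s _ st j hjst hjlt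
        · rw [Bool.or_eq_true]
          rcases hpj with hp | hp
          · exact Or.inl ((PySem.Chars.startswith_iff _ _).mpr hp)
          · exact Or.inr ((PySem.Chars.startswith_iff _ _).mpr hp)
        · intro k' hk1 hk2
          rw [Bool.or_eq_false_iff]
          constructor <;> (rw [Bool.eq_false_iff, Ne, PySem.Chars.startswith_iff])
          · intro hp
            refine hmin1 (k' - st) (by omega) ?_
            rwa [hdrop k' hk1]
          · intro hp
            refine hmin2 (k' - st) (by omega) ?_
            rwa [hdrop k' hk1]
      have hne1 : ((st : Int) + g1) ≠ -1 := by omega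
      have hne2 : ((st : Int) + g2) ≠ -1 := by omega
      have hends : List.filter (fun e => decide (e ≠ -1)) [(st : Int) + g1, (st : Int) + g2] =
          [(st : Int) + g1, (st : Int) + g2] := by simp [hne1, hne2]
      have hmin? : PySem.List.min? [(st : Int) + g1, (st : Int) + g2] (fun x => x) =
          some (min ((st : Int) + g1) ((st : Int) + g2)) := by
        rw [PySem.List.min?_id_cons]; simp
      have hcj : ((j : Nat) : Int) = min ((st : Int) + g1) ((st : Int) + g2) := by omega
      simp only [PySem.Chars.slice_eq_listSlice, if_neg hg1, if_neg hg2, hends, ← hst, hmin?, hscan2, hcj]
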